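-- pv_equiv track=rewrite | github.com/Grzegorz-Oledzki/advent-of-code | 2018 day 2.py | get_result_of_part_one
-- ===== SOURCE A (Python) =====
-- def get_result_of_part_one(inputs):
--     num_of_codes_with_two_same_letters = 0
--     num_of_codes_with_three_same_letters = 0
--     for code in inputs:
--         are_there_two_letters = False
--         are_there_three_letters = False
--         for letter in code:
--             if code.count(letter) == 2:
--                 are_there_two_letters = True
--             if code.count(letter) == 3:
--                 are_there_three_letters = True
--         if are_there_two_letters:
--             num_of_codes_with_three_same_letters += 1
--         if are_there_three_letters:
--             num_of_codes_with_two_same_letters += 1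
--     return num_of_codes_with_three_same_letters * num_of_codes_with_two_same_letters
-- ===== SOURCE B (Python) =====
-- def run_lengths(code):
--     """Distinct run lengths of the sorted characters of code."""
--     lengths = set()
--     cs = sorted(code)
--     while cs:
--         head = cs[0]
--         k = 1
--         while k < len(cs) and cs[k] == head:
--             k += 1
--         lengths.add(k)
--         cs = cs[k:]
--     return lengths
--
--
-- def get_result_of_part_one(inputs):
--     twos = 0
--     threes = 0
--     for code in inputs:
--         lengths = run_lengths(code)
--         if 2 in lengths:
--             twos += 1
--         if 3 in lengths:
--             threes += 1
--     return twos * threes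
-- ===== Notes on version B (the rewrite author's own statement) =====
-- stated objective: alternative
-- what changed: A scans the whole code with code.count for every letter position (quadratic per code); B sorts each code once and walks consecutive equal-character runs, collecting the distinct run lengths into a set that is then probed for 2 and 3.
import Mathlib
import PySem

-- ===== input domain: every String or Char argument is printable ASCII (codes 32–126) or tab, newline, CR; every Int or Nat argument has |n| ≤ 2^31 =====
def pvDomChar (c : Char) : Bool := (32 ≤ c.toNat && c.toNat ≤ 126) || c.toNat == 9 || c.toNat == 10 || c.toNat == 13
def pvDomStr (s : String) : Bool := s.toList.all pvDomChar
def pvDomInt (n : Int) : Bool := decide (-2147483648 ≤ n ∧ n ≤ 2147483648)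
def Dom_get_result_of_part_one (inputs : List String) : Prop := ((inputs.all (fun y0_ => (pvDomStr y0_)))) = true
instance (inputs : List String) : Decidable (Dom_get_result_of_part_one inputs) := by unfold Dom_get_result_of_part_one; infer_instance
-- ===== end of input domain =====

-- B sorts each code and scans equal-character runs once instead of A's per-letter code.count scans (alternative decomposition).

-- ===== PORT A =====
-- 'code.count(letter)' has a 1-character needle, so it is the per-character count: ported as List.count (exact).
def get_result_of_part_one (inputs : List String) : Int :=
  let res := inputs.foldl (fun (acc : Int × Int) code =>
    let cs := code.toList
    let flags := cs.foldl (fun (fl : Bool × Bool) letter =>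
      ((if cs.count letter == 2 then true else fl.1),
       (if cs.count letter == 3 then true else fl.2))) (false, false)
    let acc1 := if flags.1 then (acc.1, acc.2 + 1) else acc
    if flags.2 then (acc1.1 + 1, acc1.2) else acc1) ((0 : Int), (0 : Int))
  res.2 * res.1

-- ===== PORT B =====
-- the 'while cs:' loop of run_lengths: one maximal run (head, k) per step, then cs = cs[k:]
def runLoop (lengths : PySem.Set Int) : List Char → PySem.Set Int
  | [] => lengths
  | c :: rest =>
      runLoop (PySem.Set.add lengths (1 + ((rest.takeWhile (· == c)).length : Int)))
              (rest.dropWhile (· == c))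
  termination_by cs => cs.length
  decreasing_by
    simp only [List.length_cons]
    exact Nat.lt_succ_of_le (List.length_dropWhile_le _ _)

def run_lengths (code : String) : PySem.Set Int :=
  runLoop PySem.Set.empty (PySem.List.sorted code.toList (fun x => x) false)

def get_result_of_part_one_alt (inputs : List String) : Int :=
  let res := inputs.foldl (fun (acc : Int × Int) code =>
    let lengths := run_lengths code
    let acc1 := if PySem.Set.contains lengths 2 then (acc.1 + 1, acc.2) else acc
    if PySem.Set.contains lengths 3 then (acc1.1, acc1.2 + 1) else acc1) ((0 : Int), (0 : Int))
  res.1 * res.2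

-- ===== PRECONDITION & SPEC =====
def Spec_get_result_of_part_one (inputs : List String) (out : Int) : Prop := out = get_result_of_part_one_alt inputs
instance (inputs : List String) (out : Int) : Decidable (Spec_get_result_of_part_one inputs out) := by unfold Spec_get_result_of_part_one; infer_instance

-- ===== CLAIM (what is proved, stated in full; the proofs are below) =====
def Claim_equal_get_result_of_part_one : Prop := ∀ (inputs : List String), Dom_get_result_of_part_one inputs → Spec_get_result_of_part_one inputs (get_result_of_part_one inputs)

-- ===== LEMMAS AND PROOFS =====

-- everything after the first run of a sorted list is strictly above its head
theorem pv_tail_gt (c : Char) (rest : List Char) (h : (c :: rest).Pairwise (· ≤ ·)) :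
    ∀ d ∈ rest.dropWhile (· == c), c < d := by
  induction rest with
  | nil => simp
  | cons r rs ih =>
    rcases List.pairwise_cons.mp h with ⟨hc, hr⟩
    by_cases hrc : (r == c) = true
    · simp only [List.dropWhile_cons, hrc, if_true]
      apply ih
      refine List.pairwise_cons.mpr ⟨?_, (List.pairwise_cons.mp hr).2⟩
      intro d hd
      exact hc d (List.mem_cons_of_mem _ hd)
    · rw [List.dropWhile_cons, if_neg hrc]
      have hcr : c < r := lt_of_le_of_ne (hc r (List.mem_cons_self)) (Ne.symm (by simpa using hrc))
      intro d hd
      rcases List.mem_cons.mp hd with rfl | hd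
      · exact hcr
      · exact lt_of_lt_of_le hcr ((List.pairwise_cons.mp hr).1 d hd)

theorem pv_count_head (c : Char) (rest : List Char) (h : (c :: rest).Pairwise (· ≤ ·)) :
    (c :: rest).count c = 1 + (rest.takeWhile (· == c)).length := by
  have hsplit : rest = rest.takeWhile (· == c) ++ rest.dropWhile (· == c) :=
    (List.takeWhile_append_dropWhile).symm
  have htake : (rest.takeWhile (· == c)).count c = (rest.takeWhile (· == c)).length := by
    rw [List.count_eq_length]
    intro b hb
    exact ((by simpa using List.mem_takeWhile_imp hb : b = c)).symm
  have hdrop : (rest.dropWhile (· == c)).count c = 0 := by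
    rw [List.count_eq_zero]
    intro hmem
    exact absurd rfl (ne_of_gt (pv_tail_gt c rest h c hmem))
  rw [List.count_cons_self]
  conv_lhs => rw [hsplit]
  rw [List.count_append, htake, hdrop]
  omega

theorem pv_count_tail (c : Char) (rest : List Char) (h : (c :: rest).Pairwise (· ≤ ·))
    (d : Char) (hd : d ∈ rest.dropWhile (· == c)) :
    (c :: rest).count d = (rest.dropWhile (· == c)).count d := by
  have hdc : d ≠ c := ne_of_gt (pv_tail_gt c rest h d hd)
  have hsplit : rest = rest.takeWhile (· == c) ++ rest.dropWhile (· == c) :=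
    (List.takeWhile_append_dropWhile).symm
  have htake : (rest.takeWhile (· == c)).count d = 0 := by
    rw [List.count_eq_zero]
    intro hmem
    have := List.mem_takeWhile_imp hmem
    exact hdc (by simpa using this)
  have hstep : (c :: rest).count d = rest.count d := by
    simp [Ne.symm hdc]
  rw [hstep]
  conv_lhs => rw [hsplit]
  rw [List.count_append, htake]
  omega

theorem pv_pairwise_tail (c : Char) (rest : List Char) (h : (c :: rest).Pairwise (· ≤ ·)) :
    (rest.dropWhile (· == c)).Pairwise (· ≤ ·) :=
  ((List.pairwise_cons.mp h).2).sublist (List.dropWhile_sublist _)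

-- runLoop collects exactly the letter multiplicities of a sorted list
theorem pv_mem_runLoop (lengths : PySem.Set Int) (s : List Char) (n : Int)
    (h : s.Pairwise (· ≤ ·)) :
    n ∈ runLoop lengths s ↔ n ∈ lengths ∨ ∃ d ∈ s, (s.count d : Int) = n := by
  induction lengths, s using runLoop.induct with
  | case1 lengths => simp [runLoop]
  | case2 lengths c rest ih =>
    rw [runLoop]
    rw [ih (pv_pairwise_tail c rest h)]
    rw [PySem.Set.mem_add]
    have hhead : ((c :: rest).count c : Int) = 1 + ((rest.takeWhile (· == c)).length : Int) := by
      rw [pv_count_head c rest h]; push_cast; ring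
    constructor
    · rintro ((hl | rfl) | ⟨d, hd, hdn⟩)
      · exact Or.inl hl
      · exact Or.inr ⟨c, List.mem_cons_self, hhead⟩
      · refine Or.inr ⟨d, ?_, ?_⟩
        · exact List.mem_cons_of_mem _ ((List.dropWhile_sublist _).subset hd)
        · rw [pv_count_tail c rest h d hd]; exact hdn
    · rintro (hl | ⟨d, hd, hdn⟩)
      · exact Or.inl (Or.inl hl)
      · rcases List.mem_cons.mp hd with rfl | hd
        · exact Or.inl (Or.inr (by rw [← hdn, hhead]))
        · have hsplit : rest = rest.takeWhile (· == c) ++ rest.dropWhile (· == c) :=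
            (List.takeWhile_append_dropWhile).symm
          rw [hsplit] at hd
          rcases List.mem_append.mp hd with hd | hd
          · have hdc : d = c := by simpa using List.mem_takeWhile_imp hd
            subst hdc
            exact Or.inl (Or.inr (by rw [← hdn, hhead]))
          · refine Or.inr ⟨d, hd, ?_⟩
            rw [← pv_count_tail c rest h d hd]; exact hdn

-- per-code bridge: A's "some letter occurs exactly k times" = B's "k is a run length of the sorted code"
theorem pv_flag_eq (cs : List Char) (k : Nat) :
    cs.any (fun c => cs.count c == k)
      = PySem.Set.contains (runLoop PySem.Set.empty (PySem.List.sorted cs (fun x => x) false)) (k : Int) := by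
  set s := PySem.List.sorted cs (fun x => x) false with hs
  have hperm : s.Perm cs := PySem.List.sorted_perm cs (fun x => x) false
  have hpair : s.Pairwise (· ≤ ·) := PySem.List.sorted_pairwise cs (fun x => x)
  rw [Bool.eq_iff_iff]
  rw [PySem.Set.contains_iff]
  rw [pv_mem_runLoop _ _ _ hpair]
  simp only [List.any_eq_true, beq_iff_eq, PySem.Set.empty]
  constructor
  · rintro ⟨c, hc, hck⟩
    refine Or.inr ⟨c, hperm.mem_iff.mpr hc, ?_⟩
    rw [hperm.count_eq, hck]
  · rintro (hl | ⟨c, hc, hck⟩)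
    · simp at hl
    · refine ⟨c, hperm.mem_iff.mp hc, ?_⟩
      rw [hperm.count_eq] at hck
      exact_mod_cast hck

-- A's per-code flag pair computed by its inner loop
theorem pv_inner_flags (cs : List Char) :
    cs.foldl (fun (fl : Bool × Bool) letter =>
      ((if cs.count letter == 2 then true else fl.1),
       (if cs.count letter == 3 then true else fl.2))) (false, false)
    = (cs.any (fun c => cs.count c == 2), cs.any (fun c => cs.count c == 3)) := by
  rw [PySem.List.foldl_prod_mk
        (f := fun b letter => if cs.count letter == 2 then true else b)
        (g := fun b letter => if cs.count letter == 3 then true else b)]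
  rw [PySem.List.foldl_if_true_eq, PySem.List.foldl_if_true_eq]
  simp

-- the two outer loops mirror each other (A's accumulator is B's swapped)
theorem pv_outer (inputs : List String) (p : Int × Int) :
    inputs.foldl (fun (acc : Int × Int) code =>
      let cs := code.toList
      let flags := cs.foldl (fun (fl : Bool × Bool) letter =>
        ((if cs.count letter == 2 then true else fl.1),
         (if cs.count letter == 3 then true else fl.2))) (false, false)
      let acc1 := if flags.1 then (acc.1, acc.2 + 1) else acc
      if flags.2 then (acc1.1 + 1, acc1.2) else acc1) p
    = Prod.swap (inputs.foldl (fun (acc : Int × Int) code =>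
      let lengths := run_lengths code
      let acc1 := if PySem.Set.contains lengths 2 then (acc.1 + 1, acc.2) else acc
      if PySem.Set.contains lengths 3 then (acc1.1, acc1.2 + 1) else acc1) (Prod.swap p)) := by
  induction inputs generalizing p with
  | nil => simp
  | cons code rest ih =>
    simp only [List.foldl_cons]
    rw [ih]
    have h2 := pv_flag_eq code.toList 2
    have h3 := pv_flag_eq code.toList 3
    push_cast at h2 h3
    congr 2
    simp only [pv_inner_flags, run_lengths, ← h2, ← h3]
    cases code.toList.any (fun c => code.toList.count c == 2) <;>
      cases code.toList.any (fun c => code.toList.count c == 3) <;> simp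

-- ===== VERDICT (by name: the statement is the Claim_ definition above) =====
theorem get_result_of_part_one_spec : Claim_equal_get_result_of_part_one := by
  intro inputs _
  unfold Spec_get_result_of_part_one get_result_of_part_one get_result_of_part_one_alt
  rw [pv_outer inputs ((0 : Int), (0 : Int))]
  simp
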